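-- pv_equiv track=rewrite | github.com/BenAufGitHub/Windows-Simulator | programs/capturer/src/save_status.py | _prepare_saved
-- ===== SOURCE A (Python) =====
-- def _prepare_saved(saved):
--     groups = dict()
--     for win in saved:
--         process = win["process"].lower()
--         if process not in groups:
--             groups[process] = (list(), list())
--         groups[process][0].append(win)
--     return groups
-- ===== SOURCE B (Python) =====
-- def _prepare_saved(saved):
--     keys = list(dict.fromkeys(win["process"].lower() for win in saved))
--     return {k: ([win for win in saved if win["process"].lower() == k], [])
--             for k in keys}
-- ===== Notes on version B (the rewrite author's own statement) =====
-- stated objective: alternative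
-- what changed: Replaces the single hash-grouping pass that mutates per-key lists with a two-pass scheme: first collect the distinct lowercased process names in first-occurrence order (dict.fromkeys), then build each group by filtering the whole list per key.
import Mathlib
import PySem

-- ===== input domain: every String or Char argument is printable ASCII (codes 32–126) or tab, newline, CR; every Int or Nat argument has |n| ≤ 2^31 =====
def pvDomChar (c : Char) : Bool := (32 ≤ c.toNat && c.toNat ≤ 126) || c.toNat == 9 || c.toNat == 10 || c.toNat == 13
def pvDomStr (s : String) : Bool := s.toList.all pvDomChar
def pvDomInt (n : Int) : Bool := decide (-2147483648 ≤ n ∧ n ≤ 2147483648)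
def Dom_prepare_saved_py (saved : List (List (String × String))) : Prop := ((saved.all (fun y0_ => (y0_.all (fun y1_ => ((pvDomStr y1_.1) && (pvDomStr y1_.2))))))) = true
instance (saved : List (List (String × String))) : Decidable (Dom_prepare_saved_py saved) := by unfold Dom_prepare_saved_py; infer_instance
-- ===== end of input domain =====

-- B builds the result in two passes (ordered distinct keys, then a filter per key) instead of A's
-- single hash-grouping pass that mutates per-key lists; same result, no speed claim.

-- shared helper: win["process"].lower() (total under Pre_, which requires the key to be present)
def pvKey (w : List (String × String)) : String :=
  PySem.Str.lower ((PySem.Dict.mk w).getD "process" "")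

-- ===== PORT A =====
def prepare_saved_py (saved : List (List (String × String))) : List (String × (List (List (String × String))) × (List (List (String × String)))) :=
  (saved.foldl
    (fun groups win =>
      let process := pvKey win
      let groups := if groups.contains process then groups else groups.insert process ([], [])
      groups.modify process ([], []) (fun pr => (pr.1 ++ [win], pr.2)))
    PySem.Dict.empty).items

-- ===== PORT B =====
def prepare_saved_py_alt (saved : List (List (String × String))) : List (String × (List (List (String × String))) × (List (List (String × String)))) :=
  (PySem.List.dedup (saved.map pvKey)).map
    (fun k => (k, (saved.filter (fun win => pvKey win == k), ([] : List (List (String × String))))))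

-- ===== PRECONDITION & SPEC =====
-- Pre_: every window dict carries the "process" key (otherwise both Pythons raise KeyError).
def Pre_prepare_saved_py (saved : List (List (String × String))) : Prop :=
  (saved.all (fun w => (PySem.Dict.mk w).contains "process")) = true
instance (saved : List (List (String × String))) : Decidable (Pre_prepare_saved_py saved) := by unfold Pre_prepare_saved_py; infer_instance
def pvWitness_prepare_saved_py : (List (List (String × String))) := [[("process", "Explorer.EXE")], [("process", "explorer.exe")]]
def Spec_prepare_saved_py (saved : List (List (String × String))) (out : List (String × (List (List (String × String))) × (List (List (String × String))))) : Prop := out = prepare_saved_py_alt saved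
instance (saved : List (List (String × String))) (out : List (String × (List (List (String × String))) × (List (List (String × String))))) : Decidable (Spec_prepare_saved_py saved out) := by unfold Spec_prepare_saved_py; infer_instance

-- ===== CLAIM (what is proved, stated in full; the proofs are below) =====
def Claim_equal_prepare_saved_py : Prop := ∀ (saved : List (List (String × String))), Dom_prepare_saved_py saved → Pre_prepare_saved_py saved → Spec_prepare_saved_py saved (prepare_saved_py saved)

-- ===== LEMMAS AND PROOFS =====

-- the two-branch body of A's loop IS a single Dict.modify step
lemma pvStep_eq_modify (g : PySem.Dict String ((List (List (String × String))) × (List (List (String × String))))) (w : List (String × String)) :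
    (let process := pvKey w
     let g' := if g.contains process then g else g.insert process ([], [])
     g'.modify process ([], []) (fun pr => (pr.1 ++ [w], pr.2)))
    = g.modify (pvKey w) ([], []) (fun pr => (pr.1 ++ [w], pr.2)) := by
  by_cases h : g.contains (pvKey w) = true
  · simp [h]
  · have hf : g.contains (pvKey w) = false := by simpa using h
    simp only [hf, Bool.false_eq_true, if_false]
    simp [PySem.Dict.modify, PySem.Dict.getD_insert_self, PySem.Dict.insert_insert_self,
      PySem.Dict.getD_of_not_contains g ([], []) hf]

-- running the modify loop: each key's first slot collects exactly the filtered windows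
lemma pvGetD_loop (l : List (List (String × String)))
    (d : PySem.Dict String ((List (List (String × String))) × (List (List (String × String))))) (k : String) :
    ((l.foldl (fun g w => g.modify (pvKey w) ([], []) (fun pr => (pr.1 ++ [w], pr.2))) d).getD k ([], []))
    = ((d.getD k ([], [])).1 ++ l.filter (fun w => pvKey w == k), (d.getD k ([], [])).2) := by
  induction l generalizing d with
  | nil => simp
  | cons w l ih =>
    simp only [List.foldl_cons, ih, PySem.Dict.getD_modify, List.filter_cons]
    by_cases h : pvKey w = k
    · simp [h]
    · simp [h, Ne.symm h, beq_iff_eq]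

theorem prepare_saved_py_spec_aux (saved : List (List (String × String))) :
    prepare_saved_py saved = prepare_saved_py_alt saved := by
  unfold prepare_saved_py prepare_saved_py_alt
  have hfun : (fun (groups : PySem.Dict String ((List (List (String × String))) × (List (List (String × String))))) win =>
        let process := pvKey win
        let groups := if groups.contains process then groups else groups.insert process ([], [])
        groups.modify process ([], []) (fun pr => (pr.1 ++ [win], pr.2)))
      = (fun g w => g.modify (pvKey w) ([], []) (fun pr => (pr.1 ++ [w], pr.2))) :=
    funext fun g => funext fun w => pvStep_eq_modify g w
  rw [hfun]
  have hnd := PySem.Dict.nodup_keys_foldl_modify_key saved pvKey (([], []) : ((List (List (String × String))) × (List (List (String × String)))))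
      (fun _ w pr => (pr.1 ++ [w], pr.2)) PySem.Dict.empty (by simp)
  rw [PySem.Dict.items_eq_map_keys _ hnd ([], [])]
  rw [PySem.Dict.keys_foldl_modify_key saved pvKey (([], []) : ((List (List (String × String))) × (List (List (String × String))))) (fun _ w pr => (pr.1 ++ [w], pr.2))]
  have hkeys : PySem.Set.update ((PySem.Dict.empty : PySem.Dict String ((List (List (String × String))) × (List (List (String × String))))).keys) (saved.map pvKey)
      = PySem.List.dedup (saved.map pvKey) := by
    simp [PySem.Set.update, PySem.List.dedup, PySem.Set.ofList, PySem.Dict.empty, PySem.Dict.keys,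
      PySem.Set.empty]
  rw [hkeys]
  refine List.map_congr_left ?_
  intro k _
  rw [pvGetD_loop]
  simp

-- ===== VERDICT (by name: the statement is the Claim_ definition above) =====
theorem prepare_saved_py_spec : Claim_equal_prepare_saved_py := by
  intro saved _ _
  exact prepare_saved_py_spec_aux saved
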